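-- pv_equiv track=rewrite | github.com/galchenm/recalculation_overall_statistics_with_high_res_from_refinement | project/full_automation/visualization_utils/window_plot_volume_res.py | calculate_indices_snake_start_bottom_left
-- ===== SOURCE A (Python) =====
-- def calculate_indices_snake_start_bottom_left(number_of_pattern, NUM_PORES_PER_LINE, NUM_LINES_PER_WINDOW):
--     TOTAL_NUMBER = NUM_LINES_PER_WINDOW * NUM_PORES_PER_LINE - 1
--     for index_line in range(NUM_LINES_PER_WINDOW):
--         for index_pore in range(NUM_PORES_PER_LINE):
--             calculated_number_of_pattern = TOTAL_NUMBER - ((index_line + 1) * NUM_PORES_PER_LINE - index_pore - 1) if index_line%2 == 0 else (TOTAL_NUMBER - (index_line * NUM_PORES_PER_LINE + index_pore))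
--             if calculated_number_of_pattern == number_of_pattern:
--                 return index_line, index_pore
--     return None, None
-- ===== SOURCE B (Python) =====
-- def calculate_indices_snake_start_bottom_left(number_of_pattern, NUM_PORES_PER_LINE, NUM_LINES_PER_WINDOW):
--     if NUM_PORES_PER_LINE <= 0 or NUM_LINES_PER_WINDOW <= 0:
--         return None, None
--     total = NUM_LINES_PER_WINDOW * NUM_PORES_PER_LINE
--     m = total - 1 - number_of_pattern
--     if m < 0 or m >= total:
--         return None, None
--     index_line = m // NUM_PORES_PER_LINE
--     r = m % NUM_PORES_PER_LINE
--     index_pore = r if index_line % 2 == 1 else NUM_PORES_PER_LINE - 1 - r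
--     return index_line, index_pore
-- ===== Notes on version B (the rewrite author's own statement) =====
-- stated objective: faster
-- what changed: Replaced the nested scan over all (line,pore) grid cells with a closed-form O(1) inversion: m = L*P-1-n, line = m//P, pore from m%P by line parity, with a range check.
import Mathlib
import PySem

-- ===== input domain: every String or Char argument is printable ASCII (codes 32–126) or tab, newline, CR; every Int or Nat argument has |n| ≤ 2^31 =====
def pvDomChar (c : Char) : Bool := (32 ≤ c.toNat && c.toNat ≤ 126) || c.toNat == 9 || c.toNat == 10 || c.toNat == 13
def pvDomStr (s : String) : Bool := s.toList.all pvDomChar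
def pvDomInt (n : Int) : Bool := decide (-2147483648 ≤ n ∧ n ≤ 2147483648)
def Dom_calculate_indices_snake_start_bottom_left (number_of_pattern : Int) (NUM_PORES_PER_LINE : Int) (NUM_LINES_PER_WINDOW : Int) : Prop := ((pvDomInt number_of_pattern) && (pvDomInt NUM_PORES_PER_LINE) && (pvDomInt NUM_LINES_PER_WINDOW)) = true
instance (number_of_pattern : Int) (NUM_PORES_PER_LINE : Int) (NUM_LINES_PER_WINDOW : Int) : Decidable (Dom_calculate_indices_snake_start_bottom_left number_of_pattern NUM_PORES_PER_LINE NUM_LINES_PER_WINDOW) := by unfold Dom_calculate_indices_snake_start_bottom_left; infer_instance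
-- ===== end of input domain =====

-- B replaces A's nested scan over all (line,pore) cells by a closed-form O(1) inversion (objective: faster).

-- ===== PORT A =====
-- inner 'for index_pore in range(NUM_PORES_PER_LINE)' loop with early return
def pvInnerA (number_of_pattern NUM_PORES_PER_LINE TOTAL_NUMBER index_line : Int) : List Int → Option (Int × Int)
  | [] => none
  | index_pore :: rest =>
      let calculated_number_of_pattern :=
        if PySem.Int.mod index_line 2 = 0 then
          TOTAL_NUMBER - ((index_line + 1) * NUM_PORES_PER_LINE - index_pore - 1)
        else
          TOTAL_NUMBER - (index_line * NUM_PORES_PER_LINE + index_pore)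
      if calculated_number_of_pattern = number_of_pattern then some (index_line, index_pore)
      else pvInnerA number_of_pattern NUM_PORES_PER_LINE TOTAL_NUMBER index_line rest

-- outer 'for index_line in range(NUM_LINES_PER_WINDOW)' loop with early return
def pvOuterA (number_of_pattern NUM_PORES_PER_LINE TOTAL_NUMBER : Int) : List Int → Option (Int × Int)
  | [] => none
  | index_line :: rest =>
      match pvInnerA number_of_pattern NUM_PORES_PER_LINE TOTAL_NUMBER index_line (PySem.List.pyRange 0 NUM_PORES_PER_LINE 1) with
      | some r => some r
      | none => pvOuterA number_of_pattern NUM_PORES_PER_LINE TOTAL_NUMBER rest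

def calculate_indices_snake_start_bottom_left (number_of_pattern : Int) (NUM_PORES_PER_LINE : Int) (NUM_LINES_PER_WINDOW : Int) : Option Int × Option Int :=
  -- TOTAL_NUMBER = NUM_LINES_PER_WINDOW * NUM_PORES_PER_LINE - 1, passed to the loop helpers
  match pvOuterA number_of_pattern NUM_PORES_PER_LINE (NUM_LINES_PER_WINDOW * NUM_PORES_PER_LINE - 1) (PySem.List.pyRange 0 NUM_LINES_PER_WINDOW 1) with
  | some (il, ip) => (some il, some ip)
  | none => (none, none)

-- ===== PORT B =====
def calculate_indices_snake_start_bottom_left_alt (number_of_pattern : Int) (NUM_PORES_PER_LINE : Int) (NUM_LINES_PER_WINDOW : Int) : Option Int × Option Int :=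
  if NUM_PORES_PER_LINE ≤ 0 ∨ NUM_LINES_PER_WINDOW ≤ 0 then (none, none)
  else
    let total := NUM_LINES_PER_WINDOW * NUM_PORES_PER_LINE
    let m := total - 1 - number_of_pattern
    if m < 0 ∨ m ≥ total then (none, none)
    else
      let index_line := PySem.Int.floordiv m NUM_PORES_PER_LINE
      let r := PySem.Int.mod m NUM_PORES_PER_LINE
      let index_pore := if PySem.Int.mod index_line 2 = 1 then r else NUM_PORES_PER_LINE - 1 - r
      (some index_line, some index_pore)

-- ===== PRECONDITION & SPEC =====
def Spec_calculate_indices_snake_start_bottom_left (number_of_pattern : Int) (NUM_PORES_PER_LINE : Int) (NUM_LINES_PER_WINDOW : Int) (out : Option Int × Option Int) : Prop := out = calculate_indices_snake_start_bottom_left_alt number_of_pattern NUM_PORES_PER_LINE NUM_LINES_PER_WINDOW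
instance (number_of_pattern : Int) (NUM_PORES_PER_LINE : Int) (NUM_LINES_PER_WINDOW : Int) (out : Option Int × Option Int) : Decidable (Spec_calculate_indices_snake_start_bottom_left number_of_pattern NUM_PORES_PER_LINE NUM_LINES_PER_WINDOW out) := by unfold Spec_calculate_indices_snake_start_bottom_left; infer_instance

-- ===== CLAIM (what is proved, stated in full; the proofs are below) =====
def Claim_equal_calculate_indices_snake_start_bottom_left : Prop := ∀ (number_of_pattern : Int) (NUM_PORES_PER_LINE : Int) (NUM_LINES_PER_WINDOW : Int), Dom_calculate_indices_snake_start_bottom_left number_of_pattern NUM_PORES_PER_LINE NUM_LINES_PER_WINDOW → Spec_calculate_indices_snake_start_bottom_left number_of_pattern NUM_PORES_PER_LINE NUM_LINES_PER_WINDOW (calculate_indices_snake_start_bottom_left number_of_pattern NUM_PORES_PER_LINE NUM_LINES_PER_WINDOW)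

-- ===== LEMMAS AND PROOFS =====

-- the unique pore index on line il that makes A's formula hit number_of_pattern
def pvTarget (n P T il : Int) : Int :=
  if PySem.Int.mod il 2 = 0 then n - T + (il + 1) * P - 1 else T - il * P - n

theorem pvInnerA_eq (n P T il : Int) (xs : List Int) :
    pvInnerA n P T il xs = if pvTarget n P T il ∈ xs then some (il, pvTarget n P T il) else none := by
  induction xs with
  | nil => simp [pvInnerA]
  | cons ip rest ih =>
      by_cases hm : PySem.Int.mod il 2 = 0
      · have ht : pvTarget n P T il = n - T + (il + 1) * P - 1 := by
          unfold pvTarget; rw [if_pos hm]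
        have hiff : (T - ((il + 1) * P - ip - 1) = n) ↔ ip = pvTarget n P T il := by
          rw [ht]; constructor <;> (intro h; linarith)
        simp only [pvInnerA]
        rw [if_pos hm]
        by_cases h : ip = pvTarget n P T il
        · rw [if_pos (hiff.mpr h), if_pos (by simp [h]), h]
        · rw [if_neg (fun hc => h (hiff.mp hc)), ih]
          by_cases ht2 : pvTarget n P T il ∈ rest <;>
            simp [ht2, List.mem_cons, Ne.symm h]
      · have ht : pvTarget n P T il = T - il * P - n := by
          unfold pvTarget; rw [if_neg hm]
        have hiff : (T - (il * P + ip) = n) ↔ ip = pvTarget n P T il := by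
          rw [ht]; constructor <;> (intro h; linarith)
        simp only [pvInnerA]
        rw [if_neg hm]
        by_cases h : ip = pvTarget n P T il
        · rw [if_pos (hiff.mpr h), if_pos (by simp [h]), h]
        · rw [if_neg (fun hc => h (hiff.mp hc)), ih]
          by_cases ht2 : pvTarget n P T il ∈ rest <;>
            simp [ht2, List.mem_cons, Ne.symm h]

theorem pvOuterA_nopores (n P T : Int) (hP : P ≤ 0) (xs : List Int) :
    pvOuterA n P T xs = none := by
  induction xs with
  | nil => rfl
  | cons il rest ih =>
      have : PySem.List.pyRange 0 P 1 = [] := PySem.List.pyRange_one_eq_nil hP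
      simp [pvOuterA, this, pvInnerA, ih]

-- on line il (with P > 0) A's inner loop hits iff il*P ≤ m < (il+1)*P, where m = T - n
theorem pvTarget_mem (n P T il : Int) (_hP : 0 < P) :
    (pvTarget n P T il ∈ PySem.List.pyRange 0 P 1) ↔ (il * P ≤ T - n ∧ T - n < (il + 1) * P) := by
  rw [PySem.List.mem_pyRange_one]
  unfold pvTarget
  split <;> constructor <;> (intro h; constructor <;> linarith [h.1, h.2])

theorem pvOuterA_range (n P T : Int) (hP : 0 < P) (il0 : Int)
    (hbr : il0 * P ≤ T - n ∧ T - n < (il0 + 1) * P) :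
    ∀ (k : Nat) (a b : Int), b - a = (k : Int) →
      pvOuterA n P T (PySem.List.pyRange a b 1) =
        if a ≤ il0 ∧ il0 < b then some (il0, pvTarget n P T il0) else none := by
  intro k
  induction k with
  | zero =>
      intro a b hab
      have hba : b ≤ a := by omega
      rw [PySem.List.pyRange_one_eq_nil hba]
      rw [if_neg (by omega)]
      rfl
  | succ k ih =>
      intro a b hab
      have hlt : a < b := by omega
      rw [PySem.List.pyRange_one_cons hlt]
      simp only [pvOuterA, pvInnerA_eq]
      by_cases ha : a = il0
      · subst ha
        rw [if_pos ((pvTarget_mem n P T a hP).mpr hbr)]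
        rw [if_pos ⟨le_refl a, hlt⟩]
      · have hnot : pvTarget n P T a ∉ PySem.List.pyRange 0 P 1 := by
          intro hmem
          have hb := (pvTarget_mem n P T a hP).mp hmem
          -- two bracket characterisations of the same m force a = il0
          apply ha
          by_contra hne
          rcases lt_or_gt_of_ne hne with h1 | h1
          · have : (a + 1) * P ≤ il0 * P := by
              apply mul_le_mul_of_nonneg_right (by omega) (le_of_lt hP)
            linarith [hb.2, hbr.1]
          · have : (il0 + 1) * P ≤ a * P := by
              apply mul_le_mul_of_nonneg_right (by omega) (le_of_lt hP)
            linarith [hb.1, hbr.2]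
        rw [if_neg hnot]
        rw [ih (a + 1) b (by omega)]
        by_cases hc : a + 1 ≤ il0 ∧ il0 < b
        · rw [if_pos hc, if_pos ⟨by omega, hc.2⟩]
        · rw [if_neg hc, if_neg (by omega)]

-- ===== VERDICT (by name: the statement is the Claim_ definition above) =====
theorem calculate_indices_snake_start_bottom_left_spec : Claim_equal_calculate_indices_snake_start_bottom_left := by
  intro n P L _
  show calculate_indices_snake_start_bottom_left n P L = calculate_indices_snake_start_bottom_left_alt n P L
  by_cases hPL : P ≤ 0 ∨ L ≤ 0
  · simp only [calculate_indices_snake_start_bottom_left_alt]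
    rw [if_pos hPL]
    unfold calculate_indices_snake_start_bottom_left
    rcases hPL with hP | hL
    · rw [pvOuterA_nopores _ _ _ hP]
    · rw [PySem.List.pyRange_one_eq_nil hL]; rfl
  · push_neg at hPL
    obtain ⟨hP, hL⟩ := hPL
    have hbr : PySem.Int.floordiv (L * P - 1 - n) P * P ≤ L * P - 1 - n ∧
        L * P - 1 - n < (PySem.Int.floordiv (L * P - 1 - n) P + 1) * P :=
      (PySem.Int.floordiv_eq_iff_of_pos hP).mp rfl
    set il0 := PySem.Int.floordiv (L * P - 1 - n) P with hil0
    have houter := pvOuterA_range n P (L * P - 1) hP il0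
      (by exact ⟨hbr.1, hbr.2⟩) L.toNat 0 L (by omega)
    have hmod : PySem.Int.mod (L * P - 1 - n) P = (L * P - 1 - n) - il0 * P := by
      have h1 := PySem.Int.floordiv_mul_add_mod (L * P - 1 - n) P
      rw [← hil0] at h1; omega
    unfold calculate_indices_snake_start_bottom_left
    rw [houter]
    simp only [calculate_indices_snake_start_bottom_left_alt]
    by_cases hin : 0 ≤ il0 ∧ il0 < L
    · have hmlo : (0:Int) ≤ L * P - 1 - n := by
        have : (0:Int) ≤ il0 * P := mul_nonneg hin.1 (le_of_lt hP)
        linarith [hbr.1]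
      have hmhi : L * P - 1 - n < L * P := by
        have : (il0 + 1) * P ≤ L * P :=
          mul_le_mul_of_nonneg_right (by omega) (le_of_lt hP)
        linarith [hbr.2]
      rw [if_pos hin]
      rw [if_neg (show ¬ (P ≤ 0 ∨ L ≤ 0) by omega)]
      rw [if_neg (show ¬ (L * P - 1 - n < 0 ∨ L * P - 1 - n ≥ L * P) by
        push_neg; exact ⟨hmlo, hmhi⟩)]
      rw [← hil0, hmod]
      dsimp only
      have h2 : (0:Int) < 2 := by omega
      have hmod2lo := PySem.Int.mod_nonneg il0 h2
      have hmod2hi := PySem.Int.mod_lt il0 h2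
      unfold pvTarget
      by_cases hpar : PySem.Int.mod il0 2 = 0
      · rw [if_pos hpar, if_neg (by omega : ¬ PySem.Int.mod il0 2 = 1)]
        simp only [Prod.mk.injEq, Option.some.injEq]
        exact ⟨trivial, by linarith⟩
      · rw [if_neg hpar, if_pos (by omega : PySem.Int.mod il0 2 = 1)]
        simp only [Prod.mk.injEq, Option.some.injEq]
        exact ⟨trivial, by linarith⟩
    · rw [if_neg hin]
      rw [if_neg (show ¬ (P ≤ 0 ∨ L ≤ 0) by omega)]
      have hout : L * P - 1 - n < 0 ∨ L * P - 1 - n ≥ L * P := by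
        by_contra hc
        push_neg at hc
        apply hin
        constructor
        · by_contra h0
          push_neg at h0
          have : (il0 + 1) * P ≤ 0 := by
            have := mul_le_mul_of_nonneg_right (by omega : il0 + 1 ≤ 0) (le_of_lt hP)
            simpa using this
          linarith [hbr.2, hc.1]
        · by_contra h0
          push_neg at h0
          have : L * P ≤ il0 * P :=
            mul_le_mul_of_nonneg_right h0 (le_of_lt hP)
          linarith [hbr.1, hc.2]
      rw [if_pos hout]
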